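-- pv_equiv track=rewrite | github.com/ghdic/CodingProblemSolving | programmers/더_맵게.py | solution
-- ===== SOURCE A (Python) =====
-- import heapq
--
-- def solution(scoville, K):
--     answer = 0
--     q = []
--     for i in scoville:
--         heapq.heappush(q, i)
--     while True:
--         item = heapq.heappop(q)
--         if item >= K:
--             break
--         if len(q) == 0:
--             answer = -1
--             break
--         answer+=1
--         heapq.heappush(q, item + 2 * heapq.heappop(q))
--     return answer
-- ===== SOURCE B (Python) =====
-- def solution(scoville, K):
--     # Two-queue technique: sort once, then every newly merged value goes to the
--     # END of a second list; each merged value is >= every still-unpopped earlier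
--     # merged value, so that list stays sorted and the overall minimum is always
--     # one of the two fronts. No heap and no reinsertion into an ordered
--     # structure is ever needed.
--     base = sorted(scoville)
--     merged = []
--     i = j = 0
--     count = 0
--     while True:
--         if i < len(base) and (j >= len(merged) or base[i] <= merged[j]):
--             item = base[i]; i += 1
--         else:
--             item = merged[j]; j += 1   # IndexError on empty input, like heappop
--         if item >= K:
--             return count
--         if (len(base) - i) + (len(merged) - j) == 0:
--             return -1
--         if i < len(base) and (j >= len(merged) or base[i] <= merged[j]):
--             second = base[i]; i += 1
--         else:
--             second = merged[j]; j += 1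
--         merged.append(item + 2 * second)
--         count += 1
-- ===== Notes on version B (the rewrite author's own statement) =====
-- stated objective: faster
-- what changed: Replaces the heap simulation by the two-queue technique: sort the input once, append each newly merged value to the end of a second list (it is provably >= every still-unpopped earlier merged value, so that list stays sorted), and take the minimum as the smaller of the two list fronts -- no heap and no reinsertion into an ordered structure.
import Mathlib
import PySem

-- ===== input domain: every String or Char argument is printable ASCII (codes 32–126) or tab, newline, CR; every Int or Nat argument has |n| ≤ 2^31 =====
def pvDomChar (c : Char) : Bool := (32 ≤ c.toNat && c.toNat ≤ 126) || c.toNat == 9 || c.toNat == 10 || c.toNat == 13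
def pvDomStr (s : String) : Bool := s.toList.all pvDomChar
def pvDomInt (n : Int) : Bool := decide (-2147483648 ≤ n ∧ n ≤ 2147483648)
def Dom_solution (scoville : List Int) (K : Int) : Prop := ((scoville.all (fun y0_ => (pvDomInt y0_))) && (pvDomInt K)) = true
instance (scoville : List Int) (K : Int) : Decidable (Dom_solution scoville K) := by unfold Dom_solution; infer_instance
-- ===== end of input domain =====

-- B replaces A's heap by the two-queue technique: sort once, append merged values to a
-- second list (which provably stays sorted) and pop the smaller of the two fronts.

-- ===== PORT A =====
-- heapq on Int modeled by its observable behaviour as a min-priority queue: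
-- the queue is kept as an ascending list, heappush = ordered insertion, heappop = head.
-- (Int elements carry no identity, so this is exact for every value A can return.)
def heapPush : List Int → Int → List Int
  | [], x => [x]
  | a :: t, x => if x ≤ a then x :: a :: t else a :: heapPush t x

-- the while-loop of A: pop the min; break on >= K; -1 if alone; else merge and push back.
-- fuel (one unit per iteration, enough by construction) only makes the recursion structural.
def solLoop : Nat → List Int → Int → Int → Int
  | 0, _, _, _ => 0
  | _ + 1, [], _, _ => 0          -- unreachable: Python raises IndexError (excluded by Pre_)
  | fuel + 1, item :: q, K, answer =>
    if item ≥ K then answer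
    else match q with
      | [] => -1
      | b :: rest => solLoop fuel (heapPush rest (item + 2 * b)) K (answer + 1)

def solution (scoville : List Int) (K : Int) : Int :=
  solLoop scoville.length (scoville.foldl heapPush []) K 0

-- ===== PORT B =====
-- Source B's front pop: the branch 'i < len(base) and (j >= len(merged) or base[i] <= merged[j])',
-- on the suffixes base[i:], merged[j:]; none = IndexError on an empty pool (excluded by Pre_).
def popMin : List Int → List Int → Option (Int × List Int × List Int)
  | [], [] => none
  | x :: xs, [] => some (x, xs, [])
  | [], m :: ms => some (m, [], ms)
  | x :: xs, m :: ms => if x ≤ m then some (x, xs, m :: ms) else some (m, x :: xs, ms)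

-- Source B's while loop over (base suffix, merged suffix); merged values are APPENDED.
def solBLoop : Nat → List Int → List Int → Int → Int → Int
  | 0, _, _, _, _ => 0
  | fuel + 1, xs, ms, K, count =>
    match popMin xs ms with
    | none => 0                    -- unreachable: Python raises IndexError (excluded by Pre_)
    | some (item, xs1, ms1) =>
      if item ≥ K then count
      else match popMin xs1 ms1 with
        | none => -1
        | some (second, xs2, ms2) =>
          solBLoop fuel xs2 (ms2 ++ [item + 2 * second]) K (count + 1)

def solution_alt (scoville : List Int) (K : Int) : Int :=
  solBLoop scoville.length (PySem.List.sorted scoville (fun x => x) false) [] K 0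

-- ===== PRECONDITION & SPEC =====
-- Pre_ excludes only the empty list, on which both Pythons raise IndexError on the first pop.
def Pre_solution (scoville : List Int) (K : Int) : Prop := scoville ≠ []
instance (scoville : List Int) (K : Int) : Decidable (Pre_solution scoville K) := by unfold Pre_solution; infer_instance
def pvWitness_solution : List Int × Int := ([2, 9, 1], 7)

def Spec_solution (scoville : List Int) (K : Int) (out : Int) : Prop := out = solution_alt scoville K
instance (scoville : List Int) (K : Int) (out : Int) : Decidable (Spec_solution scoville K out) := by unfold Spec_solution; infer_instance

-- ===== CLAIM (what is proved, stated in full; the proofs are below) =====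
def Claim_equal_solution : Prop := ∀ (scoville : List Int) (K : Int), Dom_solution scoville K → Pre_solution scoville K → Spec_solution scoville K (solution scoville K)

-- ===== LEMMAS AND PROOFS =====

-- proof-only: ascending merge of two lists, tie to the left — exactly the order in which
-- solBLoop's two-front pops consume the pool.
def mergeAsc : List Int → List Int → List Int
  | [], ms => ms
  | x :: xs, [] => x :: xs
  | x :: xs, m :: ms =>
    if x ≤ m then x :: mergeAsc xs (m :: ms) else m :: mergeAsc (x :: xs) ms

-- the loop invariant carried through solBLoop: every unpopped merged value is ≤ 3·x for
-- every pool element x that was already present when it was created.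
def InvBA (xs ms : List Int) : Prop :=
  (∀ y ∈ ms, ∀ x ∈ xs, y ≤ 3 * x) ∧ ms.Pairwise (fun a b => b ≤ 3 * a)

theorem mergeAsc_nil_right (xs : List Int) : mergeAsc xs [] = xs := by
  cases xs <;> simp [mergeAsc]

theorem popMin_mergeAsc_none {xs ms : List Int} (h : popMin xs ms = none) :
    mergeAsc xs ms = [] := by
  match xs, ms with
  | [], [] => simp [mergeAsc]
  | x :: xs, [] => simp [popMin] at h
  | [], m :: ms => simp [popMin] at h
  | x :: xs, m :: ms => simp only [popMin] at h; split at h <;> simp_all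

theorem popMin_mergeAsc_some {xs ms : List Int} {v : Int} {xs' ms' : List Int}
    (h : popMin xs ms = some (v, xs', ms')) :
    mergeAsc xs ms = v :: mergeAsc xs' ms' ∧
      ((xs = v :: xs' ∧ ms = ms') ∨ (ms = v :: ms' ∧ xs = xs')) := by
  match xs, ms with
  | [], [] => simp [popMin] at h
  | x :: xs, [] =>
    simp only [popMin, Option.some.injEq, Prod.mk.injEq] at h
    obtain ⟨rfl, rfl, rfl⟩ := h
    exact ⟨by simp [mergeAsc_nil_right], Or.inl ⟨rfl, rfl⟩⟩
  | [], m :: ms =>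
    simp only [popMin, Option.some.injEq, Prod.mk.injEq] at h
    obtain ⟨rfl, rfl, rfl⟩ := h
    exact ⟨by simp [mergeAsc], Or.inr ⟨rfl, rfl⟩⟩
  | x :: xs, m :: ms =>
    simp only [popMin] at h
    split at h
    · rename_i hxm
      simp only [Option.some.injEq, Prod.mk.injEq] at h
      obtain ⟨rfl, rfl, rfl⟩ := h
      exact ⟨by simp [mergeAsc, hxm], Or.inl ⟨rfl, rfl⟩⟩
    · rename_i hxm
      simp only [Option.some.injEq, Prod.mk.injEq] at h
      obtain ⟨rfl, rfl, rfl⟩ := h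
      exact ⟨by simp [mergeAsc, hxm], Or.inr ⟨rfl, rfl⟩⟩

theorem mergeAsc_perm (xs ms : List Int) : (mergeAsc xs ms).Perm (xs ++ ms) := by
  match xs, ms with
  | [], ms => simp [mergeAsc]
  | x :: xs, [] => simp [mergeAsc]
  | x :: xs, m :: ms =>
    simp only [mergeAsc]
    split
    · exact (mergeAsc_perm xs (m :: ms)).cons x
    · refine ((mergeAsc_perm (x :: xs) ms).cons m).trans ?_
      exact (List.perm_middle (a := m) (l₁ := x :: xs) (l₂ := ms)).symm

theorem mergeAsc_sorted {xs ms : List Int} (hx : xs.Pairwise (fun a b => a ≤ b))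
    (hm : ms.Pairwise (fun a b => a ≤ b)) :
    (mergeAsc xs ms).Pairwise (fun a b => a ≤ b) := by
  match xs, ms with
  | [], ms => simpa [mergeAsc] using hm
  | x :: xs, [] => simpa [mergeAsc] using hx
  | x :: xs, m :: ms =>
    obtain ⟨hx1, hx2⟩ := List.pairwise_cons.mp hx
    obtain ⟨hm1, hm2⟩ := List.pairwise_cons.mp hm
    simp only [mergeAsc]
    split
    · rename_i hxm
      rw [List.pairwise_cons]
      refine ⟨?_, mergeAsc_sorted hx2 hm⟩
      intro b hb
      have := (mergeAsc_perm xs (m :: ms)).mem_iff.mp hb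
      rcases List.mem_append.mp this with h | h
      · exact hx1 b h
      · rcases List.mem_cons.mp h with rfl | h
        · exact hxm
        · exact le_trans hxm (hm1 b h)
    · rename_i hxm
      rw [List.pairwise_cons]
      refine ⟨?_, mergeAsc_sorted hx hm2⟩
      intro b hb
      have := (mergeAsc_perm (x :: xs) ms).mem_iff.mp hb
      rcases List.mem_append.mp this with h | h
      · rcases List.mem_cons.mp h with rfl | h
        · omega
        · have := hx1 b h; omega
      · exact hm1 b h

-- heapPush inserts into a sorted list at the sorted position
theorem heapPush_eq (q : List Int) (x : Int) :
    heapPush q x = q.takeWhile (fun a => decide (a < x)) ++ x :: q.dropWhile (fun a => decide (a < x)) := by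
  induction q with
  | nil => rfl
  | cons a t ih =>
    simp only [heapPush, List.takeWhile_cons, List.dropWhile_cons]
    by_cases h : x ≤ a
    · simp [show ¬ a < x by omega, h]
    · simp [show a < x by omega, h, ih]

theorem dropWhile_lt_ge {q : List Int} {x a : Int} (hs : q.Pairwise (fun a b => a ≤ b))
    (ha : a ∈ q.dropWhile (fun a => decide (a < x))) : x ≤ a := by
  cases hdw : q.dropWhile (fun a => decide (a < x)) with
  | nil => rw [hdw] at ha; simp at ha
  | cons d r =>
    have hd : ¬ d < x := by
      have := List.head?_dropWhile_not (fun a => decide (a < x)) q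
      rw [hdw] at this; simpa using this
    have hp : (d :: r).Pairwise (fun a b => a ≤ b) :=
      hdw ▸ (List.Pairwise.sublist (List.dropWhile_sublist _) hs)
    rw [hdw] at ha
    rcases List.mem_cons.mp ha with rfl | hmem
    · omega
    · have := (List.pairwise_cons.mp hp).1 a hmem; omega

theorem heapPush_perm (q : List Int) (x : Int) : (heapPush q x).Perm (x :: q) := by
  rw [heapPush_eq]
  refine List.perm_middle.trans ?_
  rw [List.takeWhile_append_dropWhile]

theorem heapPush_sorted (q : List Int) (x : Int) (hs : q.Pairwise (fun a b => a ≤ b)) :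
    (heapPush q x).Pairwise (fun a b => a ≤ b) := by
  rw [heapPush_eq, List.pairwise_append]
  refine ⟨List.Pairwise.sublist (List.takeWhile_sublist _) hs, ?_, ?_⟩
  · rw [List.pairwise_cons]
    exact ⟨fun b hb => dropWhile_lt_ge hs hb,
      List.Pairwise.sublist (List.dropWhile_sublist _) hs⟩
  · intro a ha b hb
    have hax : a < x := by simpa using List.mem_takeWhile_imp ha
    rcases List.mem_cons.mp hb with rfl | hb'
    · omega
    · have := dropWhile_lt_ge hs hb'; omega

theorem foldl_heapPush (l : List Int) : ∀ (acc : List Int), acc.Pairwise (fun a b => a ≤ b) →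
    (l.foldl heapPush acc).Pairwise (fun a b => a ≤ b) ∧ (l.foldl heapPush acc).Perm (acc ++ l) := by
  induction l with
  | nil => intro acc h; simpa using h
  | cons a t ih =>
    intro acc h
    obtain ⟨h1, h2⟩ := ih (heapPush acc a) (heapPush_sorted _ _ h)
    refine ⟨h1, h2.trans (((heapPush_perm acc a).append_right t).trans ?_)⟩
    exact List.perm_middle.symm

-- A's heap (ascending-list model) after the build loop is the ascending sort of scoville
theorem build_eq_sorted (scoville : List Int) :
    scoville.foldl heapPush [] = PySem.List.sorted scoville (fun x => x) false := by
  obtain ⟨h1, h2⟩ := foldl_heapPush scoville [] (by simp)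
  symm
  apply List.Perm.eq_of_pairwise (le := fun a b : Int => a ≤ b)
    (fun a b _ _ hab hba => le_antisymm hab hba)
    (PySem.List.sorted_pairwise scoville (fun x => x)) h1
  exact (PySem.List.sorted_perm _ _ _).trans (by simpa using h2.symm)

-- THE LOOP CORRESPONDENCE: under the invariant, B's two-queue loop computes exactly
-- A's loop on the merged (ascending) pool.
theorem loop_eq : ∀ (fuel : Nat) (xs ms : List Int),
    (mergeAsc xs ms).length ≤ fuel →
    xs.Pairwise (fun a b => a ≤ b) → ms.Pairwise (fun a b => a ≤ b) → InvBA xs ms →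
    ∀ (K ans : Int), solBLoop fuel xs ms K ans = solLoop fuel (mergeAsc xs ms) K ans := by
  intro fuel
  induction fuel with
  | zero => intro xs ms _ _ _ _ K ans; rfl
  | succ fuel ih =>
    intro xs ms hlen hxs hms hinv K ans
    cases h1 : popMin xs ms with
    | none =>
      rw [popMin_mergeAsc_none h1]
      simp [solBLoop, solLoop, h1]
    | some t1 =>
      obtain ⟨item, xs1, ms1⟩ := t1
      obtain ⟨hm1, hc1⟩ := popMin_mergeAsc_some h1
      simp only [solBLoop, h1, hm1, solLoop]
      by_cases hK : item ≥ K
      · rw [if_pos hK, if_pos hK]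
      · rw [if_neg hK, if_neg hK]
        -- facts about the state after the first pop
        have hxs1 : xs1.Pairwise (fun a b => a ≤ b) := by
          rcases hc1 with ⟨rfl, rfl⟩ | ⟨rfl, rfl⟩
          · exact (List.pairwise_cons.mp hxs).2
          · exact hxs
        have hms1 : ms1.Pairwise (fun a b => a ≤ b) := by
          rcases hc1 with ⟨rfl, rfl⟩ | ⟨rfl, rfl⟩
          · exact hms
          · exact (List.pairwise_cons.mp hms).2
        -- every unpopped merged value is ≤ 3·item
        have h3item : ∀ y ∈ ms1, y ≤ 3 * item := by
          rcases hc1 with ⟨rfl, rfl⟩ | ⟨rfl, rfl⟩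
          · intro y hy; exact hinv.1 y hy item (by simp)
          · intro y hy; exact (List.pairwise_cons.mp hinv.2).1 y hy
        have hinv1 : InvBA xs1 ms1 := by
          rcases hc1 with ⟨rfl, rfl⟩ | ⟨rfl, rfl⟩
          · exact ⟨fun y hy x hx => hinv.1 y hy x (by simp [hx]), hinv.2⟩
          · exact ⟨fun y hy x hx => hinv.1 y (by simp [hy]) x hx,
              (List.pairwise_cons.mp hinv.2).2⟩
        cases h2 : popMin xs1 ms1 with
        | none =>
          rw [popMin_mergeAsc_none h2]
        | some t2 =>
          obtain ⟨second, xs2, ms2⟩ := t2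
          obtain ⟨hm2, hc2⟩ := popMin_mergeAsc_some h2
          simp only [hm2]
          -- structural facts after the second pop
          have hxs2 : xs2.Pairwise (fun a b => a ≤ b) := by
            rcases hc2 with ⟨rfl, rfl⟩ | ⟨rfl, rfl⟩
            · exact (List.pairwise_cons.mp hxs1).2
            · exact hxs1
          have hms2 : ms2.Pairwise (fun a b => a ≤ b) := by
            rcases hc2 with ⟨rfl, rfl⟩ | ⟨rfl, rfl⟩
            · exact hms1
            · exact (List.pairwise_cons.mp hms1).2
          have h3item2 : ∀ y ∈ ms2, y ≤ 3 * item := by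
            rcases hc2 with ⟨rfl, rfl⟩ | ⟨rfl, rfl⟩
            · exact h3item
            · exact fun y hy => h3item y (by simp [hy])
          have hinv2 : InvBA xs2 ms2 := by
            rcases hc2 with ⟨rfl, rfl⟩ | ⟨rfl, rfl⟩
            · exact ⟨fun y hy x hx => hinv1.1 y hy x (by simp [hx]), hinv1.2⟩
            · exact ⟨fun y hy x hx => hinv1.1 y (by simp [hy]) x hx,
                (List.pairwise_cons.mp hinv1.2).2⟩
          -- the whole pool is sorted: item ≤ second ≤ each remaining element
          have hq : (mergeAsc xs ms).Pairwise (fun a b => a ≤ b) := mergeAsc_sorted hxs hms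
          rw [hm1, hm2] at hq
          obtain ⟨hitem_le, hq'⟩ := List.pairwise_cons.mp hq
          obtain ⟨hsecond_le, hrest⟩ := List.pairwise_cons.mp hq'
          have hitem_second : item ≤ second := hitem_le second (by simp)
          set m : Int := item + 2 * second with hmdef
          -- the new merged suffix stays sorted
          have hms2m : (ms2 ++ [m]).Pairwise (fun a b => a ≤ b) := by
            rw [List.pairwise_append]
            refine ⟨hms2, by simp, ?_⟩
            intro y hy b hb
            rcases List.mem_singleton.mp hb with rfl
            have := h3item2 y hy
            omega
          -- the invariant is re-established: members of xs2/ms2 are in the rest, hence ≥ second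
          have hmemrest : ∀ x, x ∈ xs2 ∨ x ∈ ms2 → second ≤ x := by
            intro x hx
            refine hsecond_le x ?_
            exact (mergeAsc_perm xs2 ms2).mem_iff.mpr (List.mem_append.mpr hx)
          have hinvm : InvBA xs2 (ms2 ++ [m]) := by
            constructor
            · intro y hy x hx
              rcases List.mem_append.mp hy with hy | hy
              · exact hinv2.1 y hy x hx
              · rcases List.mem_singleton.mp hy with rfl
                have := hmemrest x (Or.inl hx)
                omega
            · rw [List.pairwise_append]
              refine ⟨hinv2.2, by simp, ?_⟩
              intro y hy b hb
              rcases List.mem_singleton.mp hb with rfl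
              have := hmemrest y (Or.inr hy)
              omega
          -- A's heapPush on the rest equals the merge with the appended value
          have hperm : (heapPush (mergeAsc xs2 ms2) m).Perm (xs2 ++ (ms2 ++ [m])) := by
            refine (heapPush_perm _ _).trans ?_
            refine ((mergeAsc_perm xs2 ms2).cons m).trans ?_
            rw [← List.append_assoc]
            exact List.perm_append_comm (l₁ := [m]) (l₂ := xs2 ++ ms2)
          have hpush : heapPush (mergeAsc xs2 ms2) m = mergeAsc xs2 (ms2 ++ [m]) := by
            apply List.Perm.eq_of_pairwise (le := fun a b : Int => a ≤ b)
              (fun a b _ _ hab hba => le_antisymm hab hba)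
              (heapPush_sorted _ _ (mergeAsc_sorted hxs2 hms2))
              (mergeAsc_sorted hxs2 hms2m)
            exact hperm.trans (mergeAsc_perm xs2 (ms2 ++ [m])).symm
          -- fuel bookkeeping
          have hlen2 : (mergeAsc xs2 (ms2 ++ [m])).length ≤ fuel := by
            have e1 : (mergeAsc xs ms).length = xs.length + ms.length := by
              rw [(mergeAsc_perm xs ms).length_eq, List.length_append]
            have e2 : (mergeAsc xs2 (ms2 ++ [m])).length = xs2.length + ms2.length + 1 := by
              rw [(mergeAsc_perm xs2 (ms2 ++ [m])).length_eq]
              simp only [List.length_append, List.length_cons, List.length_nil]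
              omega
            have exm : xs.length + ms.length = xs1.length + ms1.length + 1 := by
              rcases hc1 with ⟨ha, hb⟩ | ⟨ha, hb⟩ <;>
                rw [ha, hb] <;> simp only [List.length_cons] <;> omega
            have exm2 : xs1.length + ms1.length = xs2.length + ms2.length + 1 := by
              rcases hc2 with ⟨ha, hb⟩ | ⟨ha, hb⟩ <;>
                rw [ha, hb] <;> simp only [List.length_cons] <;> omega
            omega
          rw [ih xs2 (ms2 ++ [m]) hlen2 hxs2 hms2m hinvm K (ans + 1), hpush]

-- ===== VERDICT (by name: the statement is the Claim_ definition above) =====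
theorem solution_spec : Claim_equal_solution := by
  intro scoville K _hdom _hpre
  unfold Spec_solution solution solution_alt
  rw [build_eq_sorted,
    loop_eq scoville.length (PySem.List.sorted scoville (fun x => x) false) []
      (by rw [mergeAsc_nil_right, PySem.List.length_sorted])
      (PySem.List.sorted_pairwise scoville (fun x => x))
      (by simp) ⟨by simp, by simp⟩ K 0,
    mergeAsc_nil_right]
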